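-- pv_equiv track=rewrite | github.com/shangita/openalgo | broker/mt5/mapping/order_data.py | calculate_order_statistics
-- ===== SOURCE A (Python) =====
-- def calculate_order_statistics(order_data):
--     """Calculate order statistics from order book."""
--     stats = {
--         "total_buy_orders": 0,
--         "total_sell_orders": 0,
--         "total_open_orders": 0,
--         "total_completed_orders": 0,
--         "total_rejected_orders": 0,
--     }
--
--     for order in (order_data or []):
--         action = order.get("action", "").upper()
--         status = order.get("status", "").lower()
--
--         if action == "BUY":
--             stats["total_buy_orders"] += 1
--         elif action == "SELL":
--             stats["total_sell_orders"] += 1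
--
--         if status == "open":
--             stats["total_open_orders"] += 1
--         elif status == "complete":
--             stats["total_completed_orders"] += 1
--         elif status == "rejected":
--             stats["total_rejected_orders"] += 1
--
--     return stats
-- ===== SOURCE B (Python) =====
-- def calculate_order_statistics(order_data):
--     """Calculate order statistics from order book."""
--     orders = order_data or []
--     actions = [o.get("action", "").upper() for o in orders]
--     statuses = [o.get("status", "").lower() for o in orders]
--     return {
--         "total_buy_orders": actions.count("BUY"),
--         "total_sell_orders": actions.count("SELL"),
--         "total_open_orders": statuses.count("open"),
--         "total_completed_orders": statuses.count("complete"),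
--         "total_rejected_orders": statuses.count("rejected"),
--     }
-- ===== Notes on version B (the rewrite author's own statement) =====
-- stated objective: idiomatic
-- what changed: Replaces the single-pass if/elif accumulation into a mutable stats dict by tabulating the uppercased actions and lowercased statuses once and assembling the result dict from list.count lookups on the fixed keys.
import Mathlib
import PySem

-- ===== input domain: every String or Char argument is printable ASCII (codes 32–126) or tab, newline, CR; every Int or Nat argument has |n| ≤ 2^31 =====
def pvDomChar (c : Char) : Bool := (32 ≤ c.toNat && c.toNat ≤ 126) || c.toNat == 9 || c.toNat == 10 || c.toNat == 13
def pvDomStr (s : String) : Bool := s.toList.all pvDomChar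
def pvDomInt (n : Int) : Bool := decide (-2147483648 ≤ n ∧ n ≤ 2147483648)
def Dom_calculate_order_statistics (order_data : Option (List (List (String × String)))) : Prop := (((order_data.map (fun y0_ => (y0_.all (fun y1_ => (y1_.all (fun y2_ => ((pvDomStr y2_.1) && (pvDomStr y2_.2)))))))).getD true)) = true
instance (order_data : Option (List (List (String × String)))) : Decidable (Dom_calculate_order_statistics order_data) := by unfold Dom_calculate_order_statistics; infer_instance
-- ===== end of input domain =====

-- B tabulates the uppercased actions and lowercased statuses once and assembles the stats
-- dict from list.count lookups on the fixed keys, instead of A's if/elif accumulation (idiomatic).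

-- order.get("action", "").upper()  (shared elementary expression of both Pythons)
def pvAct (order : List (String × String)) : String :=
  PySem.Str.upper ((PySem.Dict.ofList order).getD "action" "")

-- order.get("status", "").lower()
def pvStat (order : List (String × String)) : String :=
  PySem.Str.lower ((PySem.Dict.ofList order).getD "status" "")

-- ===== PORT A =====
-- one iteration of A's for-loop over the mutable stats dict
def pvStepA (stats : PySem.Dict String Int) (order : List (String × String)) : PySem.Dict String Int :=
  let action := pvAct order
  let status := pvStat order
  let stats :=
    if action == "BUY" then stats.modify "total_buy_orders" 0 (· + 1)
    else if action == "SELL" then stats.modify "total_sell_orders" 0 (· + 1)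
    else stats
  if status == "open" then stats.modify "total_open_orders" 0 (· + 1)
  else if status == "complete" then stats.modify "total_completed_orders" 0 (· + 1)
  else if status == "rejected" then stats.modify "total_rejected_orders" 0 (· + 1)
  else stats

def calculate_order_statistics (order_data : Option (List (List (String × String)))) : List (String × Int) :=
  let stats : PySem.Dict String Int := PySem.Dict.ofList
    [("total_buy_orders", 0), ("total_sell_orders", 0), ("total_open_orders", 0),
     ("total_completed_orders", 0), ("total_rejected_orders", 0)]
  ((order_data.getD []).foldl pvStepA stats).items

-- ===== PORT B =====
def calculate_order_statistics_alt (order_data : Option (List (List (String × String)))) : List (String × Int) :=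
  let orders := order_data.getD []
  let actions := orders.map pvAct
  let statuses := orders.map pvStat
  [("total_buy_orders", (PySem.List.count actions "BUY" : Int)),
   ("total_sell_orders", (PySem.List.count actions "SELL" : Int)),
   ("total_open_orders", (PySem.List.count statuses "open" : Int)),
   ("total_completed_orders", (PySem.List.count statuses "complete" : Int)),
   ("total_rejected_orders", (PySem.List.count statuses "rejected" : Int))]

-- ===== PRECONDITION & SPEC =====
def Spec_calculate_order_statistics (order_data : Option (List (List (String × String)))) (out : List (String × Int)) : Prop := out = calculate_order_statistics_alt order_data
instance (order_data : Option (List (List (String × String)))) (out : List (String × Int)) : Decidable (Spec_calculate_order_statistics order_data out) := by unfold Spec_calculate_order_statistics; infer_instance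

-- ===== CLAIM (what is proved, stated in full; the proofs are below) =====
def Claim_equal_calculate_order_statistics : Prop := ∀ (order_data : Option (List (List (String × String)))), Dom_calculate_order_statistics order_data → Spec_calculate_order_statistics order_data (calculate_order_statistics order_data)

-- ===== LEMMAS AND PROOFS =====

-- A's stats dict with arbitrary current counts
def pvMk (a b c e r : Int) : PySem.Dict String Int :=
  PySem.Dict.ofList
    [("total_buy_orders", a), ("total_sell_orders", b), ("total_open_orders", c),
     ("total_completed_orders", e), ("total_rejected_orders", r)]

theorem pvFold_items (l : List (List (String × String))) : ∀ (a b c e r : Int),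
    (l.foldl pvStepA (pvMk a b c e r)).items =
      [("total_buy_orders", a + ((l.map pvAct).count "BUY" : Int)),
       ("total_sell_orders", b + ((l.map pvAct).count "SELL" : Int)),
       ("total_open_orders", c + ((l.map pvStat).count "open" : Int)),
       ("total_completed_orders", e + ((l.map pvStat).count "complete" : Int)),
       ("total_rejected_orders", r + ((l.map pvStat).count "rejected" : Int))] := by
  induction l with
  | nil =>
    intro a b c e r
    simp only [List.foldl_nil, List.map_nil, List.count_nil, Nat.cast_zero, add_zero]
    rfl
  | cons o l IH =>
    intro a b c e r
    rw [List.foldl_cons]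
    have hstep : ∀ a b c e r : Int, pvStepA (pvMk a b c e r) o =
        pvMk (if pvAct o = "BUY" then a + 1 else a)
             (if pvAct o ≠ "BUY" ∧ pvAct o = "SELL" then b + 1 else b)
             (if pvStat o = "open" then c + 1 else c)
             (if pvStat o ≠ "open" ∧ pvStat o = "complete" then e + 1 else e)
             (if pvStat o ≠ "open" ∧ pvStat o ≠ "complete" ∧ pvStat o = "rejected" then r + 1 else r) := by
      intro a b c e r
      by_cases hb : pvAct o = "BUY" <;> by_cases hs : pvAct o = "SELL" <;>
        by_cases ho : pvStat o = "open" <;> by_cases hc : pvStat o = "complete" <;>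
        by_cases hr : pvStat o = "rejected" <;>
        simp_all [pvStepA] <;> rfl
    rw [hstep, IH]
    simp only [List.map_cons, List.count_cons, List.cons.injEq, Prod.mk.injEq, beq_iff_eq, true_and]
    refine ⟨?_, ?_, ?_, ?_, ?_⟩ <;> split_ifs <;> simp_all <;> omega

-- ===== VERDICT (by name: the statement is the Claim_ definition above) =====
theorem calculate_order_statistics_spec : Claim_equal_calculate_order_statistics := by
  intro order_data _
  show calculate_order_statistics order_data = calculate_order_statistics_alt order_data
  have h := pvFold_items (order_data.getD []) 0 0 0 0 0
  simp only [zero_add] at h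
  simpa [calculate_order_statistics, calculate_order_statistics_alt, PySem.List.count_eq, pvMk] using h
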